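-- pv_equiv track=rewrite | github.com/wigno22/MondrianAlgorithm | kanon.py | is_l_diverse
-- ===== SOURCE A (Python) =====
-- def is_l_diverse(dataset, qi_attrs, sd_attrs, l):
--
--     groups = {} # dictionary
--     '''
--     create a dictionary [attrs] -> rows
--
--     for each row in dataset:
--         put row in dictionary[row[qi_attrs]]
--
--     result = all(len(set(group[sd_attrs])) >= l for group in dictionary)
--     '''
--     for row in dataset:
--         key = []
--         for attr in qi_attrs:
--             key.append(str(row[attr]))
--
--         key = "-".join(key)
--         if key not in groups:
--             groups[key] = []
--
--         groups[key].append(row)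
--
--     result = True
--     for group in groups:
--         '''
--         for each sensitive data attributes
--         we need to have at least l diverse values inside the group
--
--         diseases = [hearth, hearth, back, back, head, hand, leg, leg, head]
--         set(diseases) = [hearth, back, head, hand, leg]
--         len(set(diseases))) = 5
--         '''
--         for sd_attr in sd_attrs:
--             sd_attr_values = []
--             # I will create a list of different sd_attr value inside the group
--             for row in groups[group]:
--                 sd_attr_values.append( row[sd_attr] )
--
--             if len(set(sd_attr_values)) < l:
--                 result = False
--                 break
--
--     return result
-- ===== SOURCE B (Python) =====
-- def is_l_diverse(dataset, qi_attrs, sd_attrs, l):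
--     # Attribute-major, flat pass: never groups rows. Precompute each row's key once;
--     # for each sensitive attribute dedupe (key, value) pairs globally in one set and
--     # count pair multiplicities per key -- that count IS the number of distinct values
--     # of that attribute inside the group.
--     keys = ["-".join(str(row[attr]) for attr in qi_attrs) for row in dataset]
--     for attr in sd_attrs:
--         pairs = set()
--         for key, row in zip(keys, dataset):
--             pairs.add((key, row[attr]))
--         counts = {}
--         for key, _ in pairs:
--             counts[key] = counts.get(key, 0) + 1
--         if any(c < l for c in counts.values()):
--             return False
--     return True
-- ===== Notes on version B (the rewrite author's own statement) =====
-- stated objective: alternative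
-- what changed: Replaces A's group-rows-into-a-dict-then-rescan-each-group scheme with an attribute-major flat scheme that never groups rows: per sensitive attribute it dedupes (key,value) pairs in one global set and counts pair multiplicities per key (= distinct values per group), with early exit per attribute.
import Mathlib
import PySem

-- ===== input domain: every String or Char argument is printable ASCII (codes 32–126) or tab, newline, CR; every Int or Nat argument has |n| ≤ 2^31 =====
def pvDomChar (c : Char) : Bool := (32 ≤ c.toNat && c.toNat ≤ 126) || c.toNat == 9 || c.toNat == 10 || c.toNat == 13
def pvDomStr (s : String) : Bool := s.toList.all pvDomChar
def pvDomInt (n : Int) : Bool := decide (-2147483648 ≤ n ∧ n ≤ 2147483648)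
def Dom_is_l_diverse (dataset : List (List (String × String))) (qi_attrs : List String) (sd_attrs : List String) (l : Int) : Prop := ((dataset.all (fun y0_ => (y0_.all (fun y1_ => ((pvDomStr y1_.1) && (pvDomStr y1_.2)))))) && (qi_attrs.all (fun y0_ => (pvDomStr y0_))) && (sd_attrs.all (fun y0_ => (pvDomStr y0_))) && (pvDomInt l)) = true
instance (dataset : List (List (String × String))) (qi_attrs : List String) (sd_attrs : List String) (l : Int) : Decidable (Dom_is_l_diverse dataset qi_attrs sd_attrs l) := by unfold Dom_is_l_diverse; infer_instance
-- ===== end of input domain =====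

-- B replaces A's group-rows-into-a-dict-then-rescan-each-group scheme with an
-- attribute-major flat scheme that never groups rows: per sensitive attribute it
-- dedupes (key, value) pairs in one global set and counts pair multiplicities per
-- key; equivalence of the RETURN value on Pre_ (all attributes present).

-- ===== PORT A =====

-- row[attr] (a Python dict lookup) for a row given as an association list
def pvRowGet (row : List (String × String)) (attr : String) : Option String :=
  (PySem.Dict.mk row).get? attr

-- key = "-".join(str(row[attr]) for attr in qi_attrs); total form, exact under Pre_
def pvKey (qi_attrs : List String) (row : List (String × String)) : String :=
  PySem.Str.join "-" (qi_attrs.map (fun attr => (pvRowGet row attr).getD ""))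

-- the body of A's first loop: group rows by key
def pvStepA (qi_attrs : List String)
    (groups : PySem.Dict String (List (List (String × String))))
    (row : List (String × String)) : PySem.Dict String (List (List (String × String))) :=
  let key := pvKey qi_attrs row
  let groups := if groups.contains key then groups else groups.insert key []
  groups.modify key [] (fun rows => rows ++ [row])

-- A's inner 'for sd_attr in sd_attrs: … if … < l: result = False; break' for one group
def pvCheckGroup (l : Int) (rows : List (List (String × String)))
    (sd_attrs : List String) (result : Bool) : Bool :=
  match sd_attrs with
  | [] => result
  | sd_attr :: rest =>
    let sd_attr_values := rows.map (fun row => (pvRowGet row sd_attr).getD "")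
    if ((PySem.Set.ofList sd_attr_values).length : Int) < l then false
    else pvCheckGroup l rows rest result

def is_l_diverse (dataset : List (List (String × String))) (qi_attrs : List String) (sd_attrs : List String) (l : Int) : Bool :=
  let groups := dataset.foldl (pvStepA qi_attrs) PySem.Dict.empty
  groups.keys.foldl
    (fun result group => pvCheckGroup l ((groups.get? group).getD []) sd_attrs result) true

-- ===== PORT B =====

-- pairs = {(key, row[attr]) for key, row in zip(keys, dataset)}
def pvPairs (dataset : List (List (String × String))) (keys : List String) (attr : String) :
    PySem.Set (String × String) :=
  PySem.Set.ofList ((keys.zip dataset).map (fun kr => (kr.1, (pvRowGet kr.2 attr).getD "")))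

-- counts[key] = counts.get(key, 0) + 1 over the deduped pairs
def pvCounts (pairs : PySem.Set (String × String)) : PySem.Dict String Int :=
  pairs.foldl (fun d p => d.insert p.1 (d.getD p.1 0 + 1)) PySem.Dict.empty

-- B's outer loop over sd_attrs with early 'return False'
def pvLoopB (dataset : List (List (String × String))) (keys : List String) (l : Int) :
    List String → Bool
  | [] => true
  | attr :: rest =>
    let counts := pvCounts (pvPairs dataset keys attr)
    if counts.values.any (fun c => c < l) then false
    else pvLoopB dataset keys l rest

def is_l_diverse_alt (dataset : List (List (String × String))) (qi_attrs : List String) (sd_attrs : List String) (l : Int) : Bool :=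
  let keys := dataset.map (fun row => pvKey qi_attrs row)
  pvLoopB dataset keys l sd_attrs

-- ===== PRECONDITION & SPEC =====
-- Pre_ excludes datasets in which some row lacks a qi or sd attribute: there the Python
-- programs raise KeyError, except in corner cases where an earlier sd attribute already
-- failed the l-test and A's break (resp. B's early return) skips the missing lookup —
-- whether the lookup is reached there depends on the data values, so the whole
-- missing-attribute region is excluded (on it, when both return, both return False).
def Pre_is_l_diverse (dataset : List (List (String × String))) (qi_attrs : List String) (sd_attrs : List String) (l : Int) : Prop :=
  ∀ row ∈ dataset, (∀ attr ∈ qi_attrs, attr ∈ row.map Prod.fst) ∧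
    (∀ attr ∈ sd_attrs, attr ∈ row.map Prod.fst)
instance (dataset : List (List (String × String))) (qi_attrs : List String) (sd_attrs : List String) (l : Int) : Decidable (Pre_is_l_diverse dataset qi_attrs sd_attrs l) := by unfold Pre_is_l_diverse; infer_instance

def pvWitness_is_l_diverse : (List (List (String × String))) × List String × List String × Int :=
  ([[("zip", "11"), ("ill", "flu")], [("zip", "11"), ("ill", "cold")]], ["zip"], ["ill"], 2)

def Spec_is_l_diverse (dataset : List (List (String × String))) (qi_attrs : List String) (sd_attrs : List String) (l : Int) (out : Bool) : Prop := out = is_l_diverse_alt dataset qi_attrs sd_attrs l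
instance (dataset : List (List (String × String))) (qi_attrs : List String) (sd_attrs : List String) (l : Int) (out : Bool) : Decidable (Spec_is_l_diverse dataset qi_attrs sd_attrs l out) := by unfold Spec_is_l_diverse; infer_instance

-- ===== CLAIM (what is proved, stated in full; the proofs are below) =====
def Claim_equal_is_l_diverse : Prop := ∀ (dataset : List (List (String × String))) (qi_attrs : List String) (sd_attrs : List String) (l : Int), Dom_is_l_diverse dataset qi_attrs sd_attrs l → Pre_is_l_diverse dataset qi_attrs sd_attrs l → Spec_is_l_diverse dataset qi_attrs sd_attrs l (is_l_diverse dataset qi_attrs sd_attrs l)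

-- ===== LEMMAS AND PROOFS =====
-- modify is insert of the updated value (definitional in PySem)
theorem pv_modify_def {κ ν : Type} [BEq κ] (d : PySem.Dict κ ν) (k : κ) (d0 : ν) (f : ν → ν) :
    d.modify k d0 f = d.insert k (f (d.getD k d0)) := rfl

-- A's grouping step is a single Dict.modify
theorem pv_stepA_eq (qi_attrs : List String)
    (g : PySem.Dict String (List (List (String × String)))) (row : List (String × String)) :
    pvStepA qi_attrs g row
      = g.modify (pvKey qi_attrs row) [] (fun rows => rows ++ [row]) := by
  unfold pvStepA
  cases hc : g.contains (pvKey qi_attrs row) with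
  | true => simp [hc]
  | false =>
    simp only [hc, Bool.false_eq_true, if_false]
    rw [pv_modify_def, pv_modify_def, PySem.Dict.getD_insert_self,
      PySem.Dict.insert_insert_self, PySem.Dict.getD_of_not_contains _ _ hc]

def pvGroupsA (qi_attrs : List String) (dataset : List (List (String × String))) :
    PySem.Dict String (List (List (String × String))) :=
  dataset.foldl (pvStepA qi_attrs) PySem.Dict.empty

theorem pv_groupsA_getD (qi_attrs : List String) (dataset : List (List (String × String))) (k : String) :
    (pvGroupsA qi_attrs dataset).getD k []
      = dataset.filter (fun row => pvKey qi_attrs row == k) := by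
  have hf : pvStepA qi_attrs
      = fun g row => g.modify (pvKey qi_attrs row) [] (fun rows => rows ++ [row]) :=
    funext fun g => funext fun row => pv_stepA_eq qi_attrs g row
  unfold pvGroupsA
  rw [hf]
  have h := PySem.Dict.getD_foldl_modify_append
    (dataset.map (fun row => (pvKey qi_attrs row, row))) PySem.Dict.empty k
  rw [List.foldl_map] at h
  simpa [PySem.Dict.getD_empty, List.filter_map, Function.comp_def] using h

theorem pv_groupsA_keys (qi_attrs : List String) (dataset : List (List (String × String))) :
    (pvGroupsA qi_attrs dataset).keys = PySem.Set.ofList (dataset.map (pvKey qi_attrs)) := by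
  have hf : pvStepA qi_attrs
      = fun g row => g.modify (pvKey qi_attrs row) [] (fun rows => rows ++ [row]) :=
    funext fun g => funext fun row => pv_stepA_eq qi_attrs g row
  unfold pvGroupsA
  rw [hf]
  have h := PySem.Dict.keys_foldl_modify_key dataset (pvKey qi_attrs) []
    (fun _ row => fun rows => rows ++ [row]) PySem.Dict.empty
  simpa [PySem.Dict.keys_empty, PySem.Set.update_nil_left] using h

-- A's inner loop with break, as an 'all' over sd_attrs
theorem pv_checkGroup_eq (l : Int) (rows : List (List (String × String)))
    (sd_attrs : List String) (r : Bool) :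
    pvCheckGroup l rows sd_attrs r
      = (r && sd_attrs.all (fun a =>
          !(((PySem.Set.ofList (rows.map (fun row => (pvRowGet row a).getD ""))).length : Int) < l))) := by
  induction sd_attrs with
  | nil => simp [pvCheckGroup]
  | cons a rest ih =>
    simp only [pvCheckGroup, List.all_cons]
    split_ifs with h
    · simp [h]
    · simp [h, ih]

theorem pv_foldl_and {α : Type} (p : α → Bool) (xs : List α) (r : Bool) :
    xs.foldl (fun acc x => acc && p x) r = (r && xs.all p) := by
  induction xs generalizing r with
  | nil => simp
  | cons x rest ih => simp [List.foldl_cons, ih, Bool.and_assoc]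

-- characterisation of port A
theorem pv_A_char (dataset : List (List (String × String))) (qi_attrs sd_attrs : List String) (l : Int) :
    is_l_diverse dataset qi_attrs sd_attrs l
      = (PySem.Set.ofList (dataset.map (pvKey qi_attrs))).all (fun k => sd_attrs.all (fun a =>
          !(((PySem.Set.ofList ((dataset.filter (fun row => pvKey qi_attrs row == k)).map
              (fun row => (pvRowGet row a).getD ""))).length : Int) < l))) := by
  unfold is_l_diverse
  have hg : dataset.foldl (pvStepA qi_attrs) PySem.Dict.empty = pvGroupsA qi_attrs dataset := rfl
  simp only [hg]
  have hstep : (fun (result : Bool) (group : String) =>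
      pvCheckGroup l (((pvGroupsA qi_attrs dataset).get? group).getD []) sd_attrs result)
      = fun result group => result && sd_attrs.all (fun a =>
          !(((PySem.Set.ofList ((dataset.filter (fun row => pvKey qi_attrs row == group)).map
              (fun row => (pvRowGet row a).getD ""))).length : Int) < l)) := by
    funext result group
    rw [pv_checkGroup_eq]
    congr 2
    rw [← PySem.Dict.getD_eq_get?_getD, pv_groupsA_getD]
  rw [hstep, pv_foldl_and, Bool.true_and, pv_groupsA_keys]

-- ===== B-side lemmas =====

-- filter commutes with building a PySem.Set element by element
theorem pv_filter_add {α : Type} [BEq α] [LawfulBEq α] (p : α → Bool) (s : PySem.Set α) (x : α) :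
    (PySem.Set.add s x).filter p = if p x then PySem.Set.add (s.filter p) x else s.filter p := by
  by_cases hm : x ∈ s
  · rw [PySem.Set.add_of_mem hm]
    split_ifs with hp
    · rw [PySem.Set.add_of_mem (List.mem_filter.mpr ⟨hm, hp⟩)]
    · rfl
  · rw [PySem.Set.add_of_not_mem hm, List.filter_append]
    split_ifs with hp
    · rw [PySem.Set.add_of_not_mem (fun h => hm (List.mem_filter.mp h).1)]
      simp [hp]
    · simp [hp]

theorem pv_filter_foldl_add {α : Type} [BEq α] [LawfulBEq α] (p : α → Bool) (L : List α)
    (s : PySem.Set α) :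
    (L.foldl PySem.Set.add s).filter p = (L.filter p).foldl PySem.Set.add (s.filter p) := by
  induction L generalizing s with
  | nil => rfl
  | cons x rest ih =>
    rw [List.foldl_cons, ih, pv_filter_add]
    cases hp : p x <;> simp [hp]

theorem pv_filter_ofList {α : Type} [BEq α] [LawfulBEq α] (p : α → Bool) (L : List α) :
    (PySem.Set.ofList L).filter p = PySem.Set.ofList (L.filter p) := by
  rw [PySem.Set.ofList_eq_foldl, PySem.Set.ofList_eq_foldl, pv_filter_foldl_add]
  rfl

-- an injective map commutes with building a PySem.Set
theorem pv_map_add {α β : Type} [BEq α] [LawfulBEq α] [BEq β] [LawfulBEq β]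
    (f : α → β) (hinj : Function.Injective f) (s : PySem.Set α) (x : α) :
    (PySem.Set.add s x).map f = PySem.Set.add (s.map f) (f x) := by
  by_cases hm : x ∈ s
  · rw [PySem.Set.add_of_mem hm, PySem.Set.add_of_mem (List.mem_map_of_mem hm)]
  · rw [PySem.Set.add_of_not_mem hm,
      PySem.Set.add_of_not_mem (fun h => by
        obtain ⟨y, hy, he⟩ := List.mem_map.mp h
        exact hm (hinj he ▸ hy)),
      List.map_append]
    rfl

theorem pv_map_ofList {α β : Type} [BEq α] [LawfulBEq α] [BEq β] [LawfulBEq β]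
    (f : α → β) (hinj : Function.Injective f) (L : List α) :
    PySem.Set.ofList (L.map f) = (PySem.Set.ofList L).map f := by
  rw [PySem.Set.ofList_eq_foldl, PySem.Set.ofList_eq_foldl]
  have h : ∀ s : PySem.Set α,
      (L.map f).foldl PySem.Set.add (s.map f) = (L.foldl PySem.Set.add s).map f := by
    induction L with
    | nil => intro s; rfl
    | cons x rest ih =>
      intro s
      rw [List.map_cons, List.foldl_cons, List.foldl_cons, ← pv_map_add f hinj, ih]
  exact h []

-- map over zip-with-own-image, as one map
theorem pv_zip_map_map {A B C : Type} (f : A → B) (g : B × A → C) (L : List A) :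
    ((L.map f).zip L).map g = L.map (fun x => g (f x, x)) := by
  induction L with
  | nil => rfl
  | cons x rest ih => simp [ih]

-- the deduped pairs of one attribute, as a set built from the dataset
theorem pv_pairs_eq (dataset : List (List (String × String))) (qi_attrs : List String) (a : String) :
    pvPairs dataset (dataset.map (fun row => pvKey qi_attrs row)) a
      = PySem.Set.ofList (dataset.map (fun row => (pvKey qi_attrs row, (pvRowGet row a).getD ""))) := by
  unfold pvPairs
  congr 1
  exact pv_zip_map_map (fun row => pvKey qi_attrs row)
    (fun kr => (kr.1, (pvRowGet kr.2 a).getD "")) dataset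

-- the per-key multiplicity of the deduped pairs is the distinct-value count of the group
theorem pv_count_pairs (dataset : List (List (String × String))) (qi_attrs : List String)
    (a k : String) :
    (((pvPairs dataset (dataset.map (fun row => pvKey qi_attrs row)) a).map Prod.fst).count k)
      = (PySem.Set.ofList ((dataset.filter (fun row => pvKey qi_attrs row == k)).map
          (fun row => (pvRowGet row a).getD ""))).length := by
  rw [pv_pairs_eq]
  rw [List.count_eq_countP, List.countP_map, List.countP_eq_length_filter]
  have h1 : (List.filter ((fun x => x == k) ∘ Prod.fst)
        (PySem.Set.ofList (dataset.map (fun row => (pvKey qi_attrs row, (pvRowGet row a).getD "")))))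
      = PySem.Set.ofList ((dataset.map (fun row => (pvKey qi_attrs row, (pvRowGet row a).getD ""))).filter
          (fun p => p.1 == k)) := by
    exact pv_filter_ofList _ _
  rw [h1, List.filter_map]
  have h2 : (dataset.filter ((fun p => p.1 == k) ∘ (fun row => (pvKey qi_attrs row, (pvRowGet row a).getD "")))).map
        (fun row => (pvKey qi_attrs row, (pvRowGet row a).getD ""))
      = ((dataset.filter (fun row => pvKey qi_attrs row == k)).map
          (fun row => (pvRowGet row a).getD "")).map (fun v => (k, v)) := by
    rw [List.map_map]
    have hfe : dataset.filter ((fun p => p.1 == k) ∘ (fun row => (pvKey qi_attrs row, (pvRowGet row a).getD "")))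
        = dataset.filter (fun row => pvKey qi_attrs row == k) := by
      apply List.filter_congr
      intro row _; rfl
    rw [hfe]
    apply List.map_congr_left
    intro row hrow
    have hk : pvKey qi_attrs row = k := by
      have := (List.mem_filter.mp hrow).2
      simpa using this
    simp [Function.comp, hk]
  rw [h2, pv_map_ofList (fun v => (k, v)) (fun x y h => by injection h), List.length_map]

-- counts is Counter(pairs.map fst)
theorem pv_counts_eq_counter (pairs : PySem.Set (String × String)) :
    pvCounts pairs = PySem.Dict.counter (pairs.map Prod.fst) := by
  unfold pvCounts
  rw [← PySem.Dict.foldl_insert_getD_add_one_eq_counter]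
  have h : ∀ (ps : List (String × String)) (d : PySem.Dict String Int),
      ps.foldl (fun d p => d.insert p.1 (d.getD p.1 0 + 1)) d
        = (ps.map Prod.fst).foldl (fun d x => d.insert x (d.getD x 0 + 1)) d := by
    intro ps
    induction ps with
    | nil => intro d; rfl
    | cons p rest ih => intro d; simp [ih]
  exact h pairs PySem.Dict.empty

-- B's per-attribute test, characterised
theorem pv_B_attr (dataset : List (List (String × String))) (qi_attrs : List String)
    (a : String) (l : Int) :
    ((pvCounts (pvPairs dataset (dataset.map (fun row => pvKey qi_attrs row)) a)).values.any
        (fun c => c < l)) = true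
      ↔ ∃ k ∈ dataset.map (fun row => pvKey qi_attrs row),
          ((PySem.Set.ofList ((dataset.filter (fun row => pvKey qi_attrs row == k)).map
              (fun row => (pvRowGet row a).getD ""))).length : Int) < l := by
  rw [pv_counts_eq_counter]
  set ps := pvPairs dataset (dataset.map (fun row => pvKey qi_attrs row)) a with hps
  have hvals : (PySem.Dict.counter (ps.map Prod.fst)).values
      = (PySem.Set.ofList (ps.map Prod.fst)).map (fun k => ((ps.map Prod.fst).count k : Int)) := by
    show (PySem.Dict.counter (ps.map Prod.fst)).items.map Prod.snd = _
    rw [PySem.Dict.items_counter, List.map_map]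
    rfl
  rw [hvals, List.any_map, List.any_eq_true]
  constructor
  · rintro ⟨k, hk, hc⟩
    refine ⟨k, ?_, ?_⟩
    · have hk' : k ∈ ps.map Prod.fst := (PySem.Set.mem_ofList ..).mp hk
      obtain ⟨p, hp, he⟩ := List.mem_map.mp hk'
      have hp' : p ∈ dataset.map (fun row => (pvKey qi_attrs row, (pvRowGet row a).getD "")) := by
        have := hp
        rw [hps, pv_pairs_eq] at this
        exact (PySem.Set.mem_ofList ..).mp this
      obtain ⟨row, hrow, hpe⟩ := List.mem_map.mp hp'
      exact List.mem_map.mpr ⟨row, hrow, by rw [← he, ← hpe]⟩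
    · have := hc
      simp only [Function.comp_apply, decide_eq_true_eq] at this
      rwa [pv_count_pairs] at this
  · rintro ⟨k, hk, hc⟩
    refine ⟨k, ?_, ?_⟩
    · apply (PySem.Set.mem_ofList ..).mpr
      obtain ⟨row, hrow, he⟩ := List.mem_map.mp hk
      refine List.mem_map.mpr ⟨(pvKey qi_attrs row, (pvRowGet row a).getD ""), ?_, he⟩
      rw [hps, pv_pairs_eq]
      exact (PySem.Set.mem_ofList ..).mpr (List.mem_map_of_mem hrow)
    · simp only [Function.comp_apply, decide_eq_true_eq]
      rwa [pv_count_pairs]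

-- B's outer loop as an 'all'
theorem pv_loopB_eq (dataset : List (List (String × String))) (keys : List String) (l : Int)
    (sd_attrs : List String) :
    pvLoopB dataset keys l sd_attrs
      = sd_attrs.all (fun a => !((pvCounts (pvPairs dataset keys a)).values.any (fun c => c < l))) := by
  induction sd_attrs with
  | nil => rfl
  | cons a rest ih =>
    simp only [pvLoopB, List.all_cons]
    split_ifs with h
    · simp [h]
    · simp [h, ih]

-- ===== VERDICT (by name: the statement is the Claim_ definition above) =====
theorem is_l_diverse_spec : Claim_equal_is_l_diverse := by
  intro dataset qi_attrs sd_attrs l _ _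
  unfold Spec_is_l_diverse
  unfold is_l_diverse_alt
  rw [pv_A_char, pv_loopB_eq, Bool.eq_iff_iff]
  simp only [List.all_eq_true, PySem.Set.mem_ofList, Bool.not_eq_true']
  constructor
  · intro H a ha
    cases hany : ((pvCounts (pvPairs dataset (dataset.map (fun row => pvKey qi_attrs row)) a)).values.any
        (fun c => c < l)) with
    | false => rfl
    | true =>
      obtain ⟨k, hk, hc⟩ := (pv_B_attr dataset qi_attrs a l).mp hany
      have h1 := H k hk a ha
      rw [decide_eq_false_iff_not, not_lt] at h1
      omega
  · intro H k hk a ha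
    rw [decide_eq_false_iff_not, not_lt]
    by_contra hlt
    rw [not_le] at hlt
    have hany := (pv_B_attr dataset qi_attrs a l).mpr ⟨k, hk, hlt⟩
    rw [H a ha] at hany
    exact Bool.false_ne_true hany
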